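-- pv_equiv track=rewrite | github.com/washuvis/vis2024confides | api/context_window_analyzer.py | create_context_windows
-- ===== SOURCE A (Python) =====
-- def create_context_windows(tokens, target_words, window_size):
--     context_windows = {}
--
--     for target_word in target_words:
--         context_windows[target_word] = []
--         for i in range(len(tokens)):
--             if tokens[i][0].lower() == target_word.lower():
--                 start_index = max(0, i - window_size)
--                 end_index = min(len(tokens) - 1, i + window_size)
--
--                 context_window = [tokens[j] for j in range(start_index, end_index + 1)]
--                 context_windows[target_word].append(context_window)
--
--     return context_windows
-- ===== SOURCE B (Python) =====
-- def create_context_windows(tokens, target_words, window_size):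
--     # One pass over tokens: index occurrence positions by lowercased first token,
--     # then build each target's windows by direct lookup and slicing.
--     index = {}
--     for i, tok in enumerate(tokens):
--         if tok:
--             index.setdefault(tok[0].lower(), []).append(i)
--     n = len(tokens)
--     result = {}
--     for tw in target_words:
--         result[tw] = [
--             tokens[max(0, i - window_size):max(0, min(n, i + window_size + 1))]
--             for i in index.get(tw.lower(), [])
--         ]
--     return result
-- ===== Notes on version B (the rewrite author's own statement) =====
-- stated objective: faster
-- what changed: B replaces A's per-target rescan of all tokens by a single pass that indexes occurrence positions by lowercased first token, then builds each target's windows by dictionary lookup and list slicing.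
import Mathlib
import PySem

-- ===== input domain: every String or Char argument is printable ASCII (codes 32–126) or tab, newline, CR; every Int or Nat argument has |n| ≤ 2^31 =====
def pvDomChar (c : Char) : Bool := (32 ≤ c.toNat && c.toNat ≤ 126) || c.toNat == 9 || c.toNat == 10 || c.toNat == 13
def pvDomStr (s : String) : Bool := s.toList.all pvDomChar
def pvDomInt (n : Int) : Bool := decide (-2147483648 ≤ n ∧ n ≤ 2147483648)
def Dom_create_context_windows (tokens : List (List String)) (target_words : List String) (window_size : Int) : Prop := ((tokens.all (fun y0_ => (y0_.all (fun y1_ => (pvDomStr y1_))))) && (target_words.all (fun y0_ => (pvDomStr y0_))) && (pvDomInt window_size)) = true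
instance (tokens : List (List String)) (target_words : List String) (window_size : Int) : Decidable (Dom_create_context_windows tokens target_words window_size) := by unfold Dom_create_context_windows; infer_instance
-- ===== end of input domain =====

-- B builds a lowercased-first-token index in one pass over tokens and extracts windows by slicing; A rescans all tokens per target word.

-- ===== PORT A =====
def create_context_windows (tokens : List (List String)) (target_words : List String) (window_size : Int) : List (String × List (List (List String))) :=
  (target_words.foldl
    (fun d tw =>
      let d := PySem.Dict.insert d tw []
      (PySem.List.pyRange 0 (tokens.length : Int) 1).foldl
        (fun d i =>
          if PySem.Str.lower (PySem.List.pyGetD (PySem.List.pyGetD tokens i []) 0 "") == PySem.Str.lower tw then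
            let s := max 0 (i - window_size)
            let e := min ((tokens.length : Int) - 1) (i + window_size)
            PySem.Dict.modify d tw []
              (· ++ [(PySem.List.pyRange s (e + 1) 1).map (fun j => PySem.List.pyGetD tokens j [])])
          else d) d)
    PySem.Dict.empty).items

-- ===== PORT B =====
def create_context_windows_alt (tokens : List (List String)) (target_words : List String) (window_size : Int) : List (String × List (List (List String))) :=
  let index : PySem.Dict String (List Int) :=
    (PySem.List.enumerate tokens 0).foldl
      (fun d p =>
        if !p.2.isEmpty then
          PySem.Dict.modify d (PySem.Str.lower (PySem.List.pyGetD p.2 0 "")) [] (· ++ [p.1])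
        else d)
      PySem.Dict.empty
  let n : Int := tokens.length
  (target_words.foldl
    (fun r tw =>
      PySem.Dict.insert r tw
        ((PySem.Dict.getD index (PySem.Str.lower tw) []).map
          (fun i => PySem.List.slice tokens (some (max 0 (i - window_size)))
                      (some (max 0 (min n (i + window_size + 1)))))))
    PySem.Dict.empty).items

-- ===== PRECONDITION & SPEC =====
-- Pre_ excludes exactly the inputs where A raises IndexError: a nonempty target list together with an empty inner token list.
def Pre_create_context_windows (tokens : List (List String)) (target_words : List String) (window_size : Int) : Prop :=
  target_words = [] ∨ ∀ t ∈ tokens, t ≠ []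
instance (tokens : List (List String)) (target_words : List String) (window_size : Int) : Decidable (Pre_create_context_windows tokens target_words window_size) := by unfold Pre_create_context_windows; infer_instance

def pvWitness_create_context_windows : List (List String) × List String × Int :=
  ([["Cat", "x"], ["dog"], ["cat"]], ["cat", "Dog"], 1)

def Spec_create_context_windows (tokens : List (List String)) (target_words : List String) (window_size : Int) (out : List (String × List (List (List String)))) : Prop := out = create_context_windows_alt tokens target_words window_size
instance (tokens : List (List String)) (target_words : List String) (window_size : Int) (out : List (String × List (List (List String)))) : Decidable (Spec_create_context_windows tokens target_words window_size out) := by unfold Spec_create_context_windows; infer_instance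

-- ===== CLAIM =====
def Claim_equal_create_context_windows : Prop := ∀ (tokens : List (List String)) (target_words : List String) (window_size : Int), Dom_create_context_windows tokens target_words window_size → Pre_create_context_windows tokens target_words window_size → Spec_create_context_windows tokens target_words window_size (create_context_windows tokens target_words window_size)

-- ===== LEMMAS AND PROOFS =====

-- proof-only abbreviation: the lowercased first word of tokens[i]
def pvKey (tokens : List (List String)) (i : Int) : String :=
  PySem.Str.lower (PySem.List.pyGetD (PySem.List.pyGetD tokens i []) 0 "")

lemma ins_mod (d : PySem.Dict String (List (List (List String)))) (k : String)
    (v : List (List (List String))) (f : List (List (List String)) → List (List (List String))) :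
    PySem.Dict.modify (PySem.Dict.insert d k v) k [] f = PySem.Dict.insert d k (f v) := by
  simp [PySem.Dict.modify, PySem.Dict.getD_insert_self, PySem.Dict.insert_insert_self]

lemma fold_mod (l : List Int) (w : Int → List (List String)) (k : String)
    (d : PySem.Dict String (List (List (List String)))) (v : List (List (List String))) :
    l.foldl (fun d i => PySem.Dict.modify d k [] (· ++ [w i])) (PySem.Dict.insert d k v)
      = PySem.Dict.insert d k (v ++ l.map w) := by
  induction l generalizing v with
  | nil => simp
  | cons x t ih => simp only [List.foldl_cons, ins_mod, List.map_cons]; rw [ih]; simp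

lemma enum_eq (xs : List (List String)) : ∀ (s : Int),
    PySem.List.enumerate xs s
      = (PySem.List.pyRange s (s + xs.length) 1).map (fun i => (i, PySem.List.pyGetD xs (i - s) [])) := by
  induction xs with
  | nil => intro s; simp [PySem.List.enumerate_nil, PySem.List.pyRange_one_eq_nil]
  | cons x t ih =>
    intro s
    rw [PySem.List.enumerate_cons, ih (s + 1),
      PySem.List.pyRange_one_cons (by simp : s < s + ((x :: t).length : Int))]
    simp only [List.map_cons]
    refine List.cons_eq_cons.mpr ⟨?_, ?_⟩
    · simp [PySem.List.pyGetD_of_nonneg]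
    · have hr : PySem.List.pyRange (s + 1) (s + ((x :: t).length : Int)) 1
          = PySem.List.pyRange (s + 1) ((s + 1) + (t.length : Int)) 1 := by
        congr 1; simp [List.length_cons]; ring
      rw [hr]
      apply List.map_congr_left
      intro i hi
      rw [PySem.List.mem_pyRange_one] at hi
      have h1 : (0:Int) ≤ i - (s+1) := by omega
      have h2 : (0:Int) ≤ i - s := by omega
      rw [PySem.List.pyGetD_of_nonneg _ _ h2, PySem.List.pyGetD_of_nonneg _ _ h1]
      have h3 : (i - s).toNat = (i - (s+1)).toNat + 1 := by omega
      rw [h3, List.getD_cons_succ]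

-- A's index-by-index window equals B's slice window
lemma win_eq (tokens : List (List String)) (ws i : Int) :
    (PySem.List.pyRange (max 0 (i - ws)) (min ((tokens.length : Int) - 1) (i + ws) + 1) 1).map
        (fun j => PySem.List.pyGetD tokens j [])
      = PySem.List.slice tokens (some (max 0 (i - ws)))
          (some (max 0 (min ((tokens.length : Int)) (i + ws + 1)))) := by
  set n : Int := (tokens.length : Int) with hn
  set a : Int := max 0 (i - ws) with ha
  have hb : min (n - 1) (i + ws) + 1 = min n (i + ws + 1) := by omega
  rw [hb]
  set b : Int := min n (i + ws + 1) with hbdef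
  have ha0 : 0 ≤ a := by omega
  have hbn : b ≤ n := by omega
  rw [PySem.List.slice_toNat _ ha0 (by omega : (0:Int) ≤ max 0 b)]
  by_cases hab : b ≤ a
  · rw [PySem.List.pyRange_one_eq_nil hab]
    have h0 : (max 0 b).toNat - a.toNat = 0 := by omega
    rw [h0, List.take_zero]; rfl
  · push Not at hab
    have hmb : max 0 b = b := by omega
    rw [hmb]
    apply List.ext_getElem
    · simp [PySem.List.length_pyRange_one]
      omega
    · intro k hk1 hk2
      simp only [List.getElem_map, PySem.List.getElem_pyRange_one]
      rw [List.getElem_take, List.getElem_drop]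
      rw [PySem.List.pyGetD_eq_getElem _ _ (by omega) (by
        simp [PySem.List.length_pyRange_one] at hk1; omega)]
      congr 1
      simp [PySem.List.length_pyRange_one] at hk1
      omega

-- B's one-pass index looked up at key c yields exactly the indices A's scan matches
lemma index_getD (tokens : List (List String)) (h : ∀ t ∈ tokens, t ≠ []) (c : String) :
    ((PySem.List.enumerate tokens 0).foldl
        (fun d p =>
          if !p.2.isEmpty then
            PySem.Dict.modify d (PySem.Str.lower (PySem.List.pyGetD p.2 0 "")) [] (· ++ [p.1])
          else d)
        PySem.Dict.empty).getD c []
      = (PySem.List.pyRange 0 (tokens.length : Int) 1).filter (fun i => pvKey tokens i == c) := by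
  rw [enum_eq tokens 0, List.foldl_map]
  simp only [zero_add, sub_zero]
  rw [PySem.List.foldl_congr_mem _ _
    (fun d i => PySem.Dict.modify d (pvKey tokens i) [] (· ++ [i])) _ ?_]
  · rw [← List.foldl_map (f := fun i : Int => (pvKey tokens i, i))
      (g := fun d (p : String × Int) => PySem.Dict.modify d p.1 [] (· ++ [p.2]))]
    rw [PySem.Dict.getD_foldl_modify_append]
    rw [PySem.Dict.getD_empty, List.nil_append, List.filter_map]
    simp [Function.comp_def]
  · intro acc i hi
    rw [PySem.List.mem_pyRange_one] at hi
    have hg : PySem.List.pyGetD tokens i [] = tokens[i.toNat] :=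
      PySem.List.pyGetD_eq_getElem _ _ (by omega) (by omega)
    have hne : PySem.List.pyGetD tokens i [] ≠ [] := by
      rw [hg]; exact h _ (List.getElem_mem _)
    simp only [pvKey]
    rw [if_pos (by simpa using hne)]

-- ===== VERDICT =====
theorem create_context_windows_spec : Claim_equal_create_context_windows := by
  intro tokens target_words window_size _ hpre
  unfold Spec_create_context_windows
  rcases hpre with h | h
  · subst h; rfl
  · show (target_words.foldl
        (fun d tw =>
          let d := PySem.Dict.insert d tw []
          (PySem.List.pyRange 0 (tokens.length : Int) 1).foldl
            (fun d i =>
              if PySem.Str.lower (PySem.List.pyGetD (PySem.List.pyGetD tokens i []) 0 "") == PySem.Str.lower tw then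
                let s := max 0 (i - window_size)
                let e := min ((tokens.length : Int) - 1) (i + window_size)
                PySem.Dict.modify d tw []
                  (· ++ [(PySem.List.pyRange s (e + 1) 1).map (fun j => PySem.List.pyGetD tokens j [])])
              else d) d)
        PySem.Dict.empty).items
      = (target_words.foldl
        (fun r tw =>
          PySem.Dict.insert r tw
            (List.map
              (fun i => PySem.List.slice tokens (some (max 0 (i - window_size)))
                  (some (max 0 (min ((tokens.length : Int)) (i + window_size + 1)))))
              (PySem.Dict.getD
                ((PySem.List.enumerate tokens 0).foldl
                  (fun d p =>
                    if !p.2.isEmpty then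
                      PySem.Dict.modify d (PySem.Str.lower (PySem.List.pyGetD p.2 0 "")) [] (· ++ [p.1])
                    else d)
                  PySem.Dict.empty)
                (PySem.Str.lower tw) [])))
        PySem.Dict.empty).items
    apply congrArg PySem.Dict.items
    apply PySem.List.foldl_congr_mem
    intro d tw _
    rw [PySem.List.foldl_if_eq_foldl_filter
      (fun i => PySem.Str.lower (PySem.List.pyGetD (PySem.List.pyGetD tokens i []) 0 "") == PySem.Str.lower tw)
      (fun d i => PySem.Dict.modify d tw []
        (· ++ [(PySem.List.pyRange (max 0 (i - window_size)) (min ((tokens.length : Int) - 1) (i + window_size) + 1) 1).map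
                 (fun j => PySem.List.pyGetD tokens j [])]))]
    rw [fold_mod, List.nil_append, index_getD tokens h]
    exact congrArg (PySem.Dict.insert d tw)
      (List.map_congr_left (fun i _ => win_eq tokens window_size i))
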